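-- pv_equiv track=rewrite | github.com/krish6388/elevator-system | backend/myapp/views.py | find_fastest_order
-- ===== SOURCE A (Python) =====
-- def find_fastest_order(floors, cur_floor):
--     floors.sort()
--     down_lst = []
--     up_lst = []
--     for floor in floors:
--         if floor < cur_floor:
--             down_lst.append(floor)
--         elif floor > cur_floor:
--             up_lst.append(floor)
--     down_lst = down_lst[::-1]
--     final_list = floors
--     if down_lst and up_lst:
--         mx_down = abs(down_lst[-1] - cur_floor)
--         mx_up = abs(up_lst[-1] - cur_floor)
--         if mx_down < mx_up:
--             final_list = down_lst + up_lst
--         else: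
--             final_list = up_lst + down_lst
--     else:
--         final_list = down_lst + up_lst
--
--     return final_list
-- ===== SOURCE B (Python) =====
-- def find_fastest_order(floors, cur_floor):
--     floors.sort()  # keep A's in-place mutation of the argument
--     rest = [f for f in floors if f != cur_floor]
--     # serve the down side first only when both sides exist and the deepest
--     # down floor is strictly closer than the highest up floor
--     down_first = (bool(rest) and rest[0] < cur_floor < rest[-1]
--                   and cur_floor - rest[0] < rest[-1] - cur_floor)
--     if down_first:
--         key = lambda f: (f >= cur_floor, -f if f < cur_floor else f)
--     else:
--         key = lambda f: (f <= cur_floor, f if f > cur_floor else -f)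
--     return sorted(rest, key=key)
-- ===== Notes on version B (the rewrite author's own statement) =====
-- stated objective: alternative
-- what changed: Instead of A's partition-into-two-accumulators scan, reverse and concatenation, B filters out the current floor and produces the final order directly with a single keyed sort whose tuple key (side, signed distance direction) encodes the chosen serving order.
import Mathlib
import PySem

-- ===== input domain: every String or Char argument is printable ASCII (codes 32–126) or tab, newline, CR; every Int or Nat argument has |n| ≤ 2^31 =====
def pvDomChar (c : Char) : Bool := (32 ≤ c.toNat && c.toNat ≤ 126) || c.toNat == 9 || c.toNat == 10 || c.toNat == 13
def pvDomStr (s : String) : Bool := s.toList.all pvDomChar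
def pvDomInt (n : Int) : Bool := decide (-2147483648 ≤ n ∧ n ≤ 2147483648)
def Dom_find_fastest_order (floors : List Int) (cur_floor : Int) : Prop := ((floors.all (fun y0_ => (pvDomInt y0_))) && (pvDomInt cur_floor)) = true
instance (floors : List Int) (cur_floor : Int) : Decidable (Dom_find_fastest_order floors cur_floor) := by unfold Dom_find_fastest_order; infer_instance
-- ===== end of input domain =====

-- B replaces A's partition-into-two-accumulators scan, reverse and concatenation by one keyed
-- sort of the floors ≠ cur_floor whose tuple key encodes the chosen serving order (alternative;
-- same cost). Both A and B sort `floors` in place; the equivalence proved here is about the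
-- return value.


-- ===== PORT A =====
-- floors.sort() = PySem.List.sorted floors id false; down_lst[::-1] = .reverse;
-- down_lst[-1]/up_lst[-1] = pyGetD … (-1) 0, exact under the nonemptiness guard of the branch.
-- The dead assignment `final_list = floors` is omitted.
def find_fastest_order (floors : List Int) (cur_floor : Int) : List Int :=
  let s := PySem.List.sorted floors (fun x => x) false
  let p := s.foldl (fun (acc : List Int × List Int) floor =>
    if floor < cur_floor then (acc.1 ++ [floor], acc.2)
    else if cur_floor < floor then (acc.1, acc.2 ++ [floor])
    else acc) ([], [])
  let down_lst := p.1.reverse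
  let up_lst := p.2
  if down_lst ≠ [] ∧ up_lst ≠ [] then
    let mx_down := |PySem.List.pyGetD down_lst (-1) 0 - cur_floor|
    let mx_up := |PySem.List.pyGetD up_lst (-1) 0 - cur_floor|
    if mx_down < mx_up then down_lst ++ up_lst else up_lst ++ down_lst
  else down_lst ++ up_lst

-- ===== PORT B =====
-- rest[0]/rest[-1] = pyGetD … 0 0 / (-1) 0, exact under the `bool(rest)` guard; Python's tuple
-- key (bool, int) is ported as PySem.List.sorted2 with the bool as 0/1 (Python orders bools as
-- these ints); the lambdas stay the two key functions.
def find_fastest_order_alt (floors : List Int) (cur_floor : Int) : List Int :=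
  let s := PySem.List.sorted floors (fun x => x) false
  let rest := s.filter (fun f => decide (f ≠ cur_floor))
  let down_first := rest ≠ [] ∧ PySem.List.pyGetD rest 0 0 < cur_floor
    ∧ cur_floor < PySem.List.pyGetD rest (-1) 0
    ∧ cur_floor - PySem.List.pyGetD rest 0 0 < PySem.List.pyGetD rest (-1) 0 - cur_floor
  if down_first then
    PySem.List.sorted2 rest (fun f => if cur_floor ≤ f then (1 : Int) else 0)
      (fun f => if f < cur_floor then -f else f) false
  else
    PySem.List.sorted2 rest (fun f => if f ≤ cur_floor then (1 : Int) else 0)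
      (fun f => if cur_floor < f then f else -f) false

-- ===== PRECONDITION & SPEC =====
def Spec_find_fastest_order (floors : List Int) (cur_floor : Int) (out : List Int) : Prop := out = find_fastest_order_alt floors cur_floor
instance (floors : List Int) (cur_floor : Int) (out : List Int) : Decidable (Spec_find_fastest_order floors cur_floor out) := by unfold Spec_find_fastest_order; infer_instance

-- ===== CLAIM (what is proved, stated in full; the proofs are below) =====
def Claim_equal_find_fastest_order : Prop := ∀ (floors : List Int) (cur_floor : Int), Dom_find_fastest_order floors cur_floor → Spec_find_fastest_order floors cur_floor (find_fastest_order floors cur_floor)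

-- ===== LEMMAS AND PROOFS =====

-- A's accumulator loop computes the two filters
lemma partition_foldl (c : Int) : ∀ (l a b : List Int),
    l.foldl (fun (acc : List Int × List Int) x =>
      if x < c then (acc.1 ++ [x], acc.2)
      else if c < x then (acc.1, acc.2 ++ [x])
      else acc) (a, b)
    = (a ++ l.filter (fun x => decide (x < c)), b ++ l.filter (fun x => decide (c < x)))
  | [], a, b => by simp
  | x :: l, a, b => by
      by_cases h1 : x < c
      · have h2 : ¬ c < x := by omega
        simp [h1, h2, partition_foldl c l (a ++ [x]) b]
      · by_cases h2 : c < x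
        · simp [h1, h2, partition_foldl c l a (b ++ [x])]
        · simp [h1, h2, partition_foldl c l a b]

-- in a ≤-sorted list, the elements ≠ c are the elements < c followed by the elements > c
lemma filter_ne_split (c : Int) : ∀ (s : List Int), s.Pairwise (· ≤ ·) →
    s.filter (fun f => decide (f ≠ c))
      = s.filter (fun x => decide (x < c)) ++ s.filter (fun x => decide (c < x))
  | [], _ => by simp
  | a :: t, h => by
      obtain ⟨ha, ht⟩ := List.pairwise_cons.mp h
      have ih := filter_ne_split c t ht
      simp only [ne_eq, decide_not] at ih
      by_cases h1 : a < c
      · have hne : a ≠ c := by omega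
        have h3 : ¬ c < a := by omega
        simp [hne, h1, h3, ih]
      · by_cases h2 : c < a
        · have hne : a ≠ c := by omega
          have hlt : t.filter (fun x => decide (x < c)) = [] := by
            apply List.filter_eq_nil_iff.mpr
            intro x hx
            have hax := ha x hx
            simp only [decide_eq_true_eq]
            omega
          have hlt2 : t.filter (fun f => !decide (f = c)) = t.filter (fun x => decide (c < x)) := by
            apply List.filter_congr
            intro x hx
            have hax := ha x hx
            have hcx : c < x := by omega
            have hnx : ¬ x = c := by omega
            simp [hcx, hnx]
          simp [hne, h1, h2, hlt, hlt2]
        · have hac : a = c := by omega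
          subst hac
          simp only [List.filter_cons, decide_not]
          simp [ih]

-- sorted2 with two Int keys is sorted with the lexicographic pair key
lemma sorted2_eq_sorted_lex (xs : List Int) (k1 k2 : Int → Int) :
    PySem.List.sorted2 xs k1 k2 false
      = PySem.List.sorted xs (fun x => toLex (k1 x, k2 x)) false := by
  have hfun : (fun a b => decide (k1 a < k1 b) || (!decide (k1 b < k1 a) && decide (k2 a < k2 b)))
      = (fun a b => decide ((fun x => toLex (k1 x, k2 x)) a < (fun x => toLex (k1 x, k2 x)) b)) := by
    funext a b
    by_cases h1 : k1 a < k1 b <;> by_cases h2 : k1 b < k1 a <;> by_cases h3 : k2 a < k2 b <;>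
      simp [h1, h2, h3, Prod.Lex.toLex_lt_toLex] <;> omega
  show xs.foldl (fun acc x => PySem.List.insertBy
      (fun a b => decide (k1 a < k1 b) || (!decide (k1 b < k1 a) && decide (k2 a < k2 b))) x acc) []
    = _
  rw [hfun, PySem.List.sorted_eq_foldl_insertBy]

-- a Python sort equals any target that is a permutation and sorted under an injective key
lemma sorted_eq_target {κ : Type} [LinearOrder κ] (key : Int → κ)
    (hinj : Function.Injective key) (rest target : List Int)
    (hperm : target.Perm rest)
    (htp : target.Pairwise (fun a b => key a ≤ key b)) :
    PySem.List.sorted rest key false = target :=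
  PySem.List.eq_of_perm_of_pairwise_le_of_injective key hinj
    ((PySem.List.sorted_perm rest key false).trans hperm.symm)
    (PySem.List.sorted_pairwise rest key) htp

-- the down-first key is injective
lemma key1_inj (c : Int) : Function.Injective
    (fun f : Int => toLex ((if c ≤ f then (1 : Int) else 0), (if f < c then -f else f))) := by
  intro a b h
  simp only [toLex_inj, Prod.mk.injEq] at h
  split_ifs at h <;> omega

-- the up-first key is injective
lemma key2_inj (c : Int) : Function.Injective
    (fun f : Int => toLex ((if f ≤ c then (1 : Int) else 0), (if c < f then f else -f))) := by
  intro a b h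
  simp only [toLex_inj, Prod.mk.injEq] at h
  split_ifs at h <;> omega

-- sorting the two sides by the down-first key yields: down floors descending, then up ascending
lemma sorted_key1 (c : Int) (s : List Int) (hp : s.Pairwise (· ≤ ·)) :
    PySem.List.sorted (s.filter (fun x => decide (x < c)) ++ s.filter (fun x => decide (c < x)))
      (fun f => toLex ((if c ≤ f then (1 : Int) else 0), (if f < c then -f else f))) false
    = (s.filter (fun x => decide (x < c))).reverse ++ s.filter (fun x => decide (c < x)) := by
  apply sorted_eq_target _ (key1_inj c)
  · exact (List.reverse_perm _).append_right _
  · rw [List.pairwise_append]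
    refine ⟨?_, ?_, ?_⟩
    · rw [List.pairwise_reverse]
      refine (hp.filter _).imp_of_mem ?_
      intro a b hma hmb hab
      have hac : a < c := by simpa using (List.mem_filter.mp hma).2
      have hbc : b < c := by simpa using (List.mem_filter.mp hmb).2
      have h1 : ¬ c ≤ a := by omega
      have h2 : ¬ c ≤ b := by omega
      simp [Prod.Lex.toLex_le_toLex, h1, h2, hac, hbc]
      omega
    · refine (hp.filter _).imp_of_mem ?_
      intro a b hma hmb hab
      have hac : c < a := by simpa using (List.mem_filter.mp hma).2
      have hbc : c < b := by simpa using (List.mem_filter.mp hmb).2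
      have h1 : c ≤ a := by omega
      have h2 : c ≤ b := by omega
      simp [Prod.Lex.toLex_le_toLex, h1, h2]
      omega
    · intro a hma b hmb
      rw [List.mem_reverse] at hma
      have hac : a < c := by simpa using (List.mem_filter.mp hma).2
      have hbc : c < b := by simpa using (List.mem_filter.mp hmb).2
      have h1 : ¬ c ≤ a := by omega
      have h2 : c ≤ b := by omega
      simp [Prod.Lex.toLex_le_toLex, h1, h2]

-- sorting the two sides by the up-first key yields: up floors ascending, then down descending
lemma sorted_key2 (c : Int) (s : List Int) (hp : s.Pairwise (· ≤ ·)) :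
    PySem.List.sorted (s.filter (fun x => decide (x < c)) ++ s.filter (fun x => decide (c < x)))
      (fun f => toLex ((if f ≤ c then (1 : Int) else 0), (if c < f then f else -f))) false
    = s.filter (fun x => decide (c < x)) ++ (s.filter (fun x => decide (x < c))).reverse := by
  apply sorted_eq_target _ (key2_inj c)
  · exact ((List.reverse_perm _).append_left _).trans List.perm_append_comm
  · rw [List.pairwise_append]
    refine ⟨?_, ?_, ?_⟩
    · refine (hp.filter _).imp_of_mem ?_
      intro a b hma hmb hab
      have hac : c < a := by simpa using (List.mem_filter.mp hma).2
      have hbc : c < b := by simpa using (List.mem_filter.mp hmb).2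
      have h1 : ¬ a ≤ c := by omega
      have h2 : ¬ b ≤ c := by omega
      simp [Prod.Lex.toLex_le_toLex, h1, h2, hac, hbc]
      omega
    · rw [List.pairwise_reverse]
      refine (hp.filter _).imp_of_mem ?_
      intro a b hma hmb hab
      have hac : a < c := by simpa using (List.mem_filter.mp hma).2
      have hbc : b < c := by simpa using (List.mem_filter.mp hmb).2
      have h1 : a ≤ c := by omega
      have h2 : b ≤ c := by omega
      have h3 : ¬ c < a := by omega
      have h4 : ¬ c < b := by omega
      simp [Prod.Lex.toLex_le_toLex, h1, h2, h3, h4]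
      omega
    · intro a hma b hmb
      rw [List.mem_reverse] at hmb
      have hac : c < a := by simpa using (List.mem_filter.mp hma).2
      have hbc : b < c := by simpa using (List.mem_filter.mp hmb).2
      have h1 : ¬ a ≤ c := by omega
      have h2 : b ≤ c := by omega
      simp [Prod.Lex.toLex_le_toLex, h1, h2]

-- xs[0] and xs[-1] on a nonempty list
lemma pyGetD_head (l : List Int) (h : l ≠ []) : PySem.List.pyGetD l 0 0 = l.head h := by
  obtain ⟨x, t, rfl⟩ := List.exists_cons_of_ne_nil h
  simp [PySem.List.pyGetD, PySem.List.pyGet?, PySem.List.pyIdx?]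

lemma pyGetD_last (l : List Int) (h : l ≠ []) : PySem.List.pyGetD l (-1) 0 = l.getLast h := by
  obtain ⟨x, t, rfl⟩ := List.exists_cons_of_ne_nil h
  simp [PySem.List.pyGetD, PySem.List.pyGet?, PySem.List.pyIdx?, List.getLast_eq_getElem]
  rfl

-- ===== VERDICT (by name: the statement is the Claim_ definition above) =====
theorem find_fastest_order_spec : Claim_equal_find_fastest_order := by
  intro floors c _
  unfold Spec_find_fastest_order find_fastest_order find_fastest_order_alt
  set s := PySem.List.sorted floors (fun x => x) false with hs
  have hp : s.Pairwise (· ≤ ·) := by simpa using PySem.List.sorted_pairwise floors (fun x => x)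
  simp only [partition_foldl, filter_ne_split c s hp, List.nil_append, sorted2_eq_sorted_lex,
    sorted_key1 c s hp, sorted_key2 c s hp]
  set dn := s.filter (fun x => decide (x < c)) with hdn'
  set up := s.filter (fun x => decide (c < x)) with hup'
  rcases eq_or_ne dn [] with hdn | hdn <;> rcases eq_or_ne up [] with hup | hup
  · simp [hdn, hup]
  · -- no down floors: both branches on either side are `up`
    simp [hdn]
  · -- no up floors: both branches on either side are `dn.reverse`
    simp [hup]
  · -- both sides exist
    have hne : dn ++ up ≠ [] := by simp [hdn]
    have hrev : dn.reverse ≠ [] := by simpa using hdn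
    have hh : dn.head hdn < c := by
      have := List.mem_filter.mp (List.head_mem hdn)
      simpa using this.2
    have hl : c < up.getLast hup := by
      have := List.mem_filter.mp (List.getLast_mem hup)
      simpa using this.2
    have hhd : PySem.List.pyGetD (dn ++ up) 0 0 = dn.head hdn := by
      rw [pyGetD_head _ hne]
      exact List.head_append_of_ne_nil hdn
    have hlst : PySem.List.pyGetD (dn ++ up) (-1) 0 = up.getLast hup := by
      rw [pyGetD_last _ hne]
      exact List.getLast_append_right hup
    have hmxd : PySem.List.pyGetD dn.reverse (-1) 0 = dn.head hdn := by
      rw [pyGetD_last _ hrev]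
      exact List.getLast_reverse hrev
    have habs : (|PySem.List.pyGetD dn.reverse (-1) 0 - c| < |PySem.List.pyGetD up (-1) 0 - c|)
        ↔ (c - PySem.List.pyGetD (dn ++ up) 0 0 < PySem.List.pyGetD (dn ++ up) (-1) 0 - c) := by
      rw [hmxd, hhd, hlst, pyGetD_last _ hup]
      rw [abs_of_neg (by omega : dn.head hdn - c < 0), abs_of_pos (by omega : (0:Int) < up.getLast hup - c)]
      omega
    by_cases hcmp : |PySem.List.pyGetD dn.reverse (-1) 0 - c| < |PySem.List.pyGetD up (-1) 0 - c|
    · have hb := habs.mp hcmp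
      rw [if_pos ⟨hrev, hup⟩, if_pos hcmp, if_pos ⟨hne, by rw [hhd]; exact hh, by rw [hlst]; exact hl, hb⟩]
    · have hb := habs.not.mp hcmp
      rw [if_pos ⟨hrev, hup⟩, if_neg hcmp, if_neg (by
        intro hcon
        exact hb hcon.2.2.2)]
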